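-- pv_equiv track=rewrite | github.com/mcgeeyao/Contest_Solutions | CodeForces/22-04/1671E.py | dfs
-- ===== SOURCE A (Python) =====
-- def dfs(tree,i,h):
--     if i>=2**(h-1)-1:
--         return [tree[i],1]
--     ls,li=dfs(tree,i*2+1,h)
--     rs,ri=dfs(tree,i*2+2,h)
--     res=li*ri
--     if ls!=rs:
--         res*=2
--     if ls>rs:
--         return [tree[i]+rs+ls,res]
--     else:
--         return [tree[i]+ls+rs,res]
-- ===== SOURCE B (Python) =====
-- def dfs(tree, i, h):
--     if i >= 2 ** (h - 1) - 1:
--         return [tree[i], 1]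
--     # descend to the leaf row of i's subtree, then fold rows bottom-up
--     lo, w = i, 1
--     while lo < 2 ** (h - 1) - 1:
--         lo, w = 2 * lo + 1, 2 * w
--     cur = [(tree[lo + t], 1) for t in range(w)]
--     while w > 1:
--         lo, w = (lo - 1) // 2, w // 2
--         nxt = []
--         for t in range(w):
--             ls, lc = cur[2 * t]
--             rs, rc = cur[2 * t + 1]
--             res = lc * rc
--             if ls != rs:
--                 res *= 2
--             s = tree[lo + t] + (rs + ls if ls > rs else ls + rs)
--             nxt.append((s, res))
--         cur = nxt
--     return [cur[0][0], cur[0][1]]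
-- ===== Notes on version B (the rewrite author's own statement) =====
-- stated objective: alternative
-- what changed: A's top-down recursion is replaced by an explicit bottom-up level pass over i's subtree: an iterative descent to the subtree's leaf row, then a loop that repeatedly combines adjacent pairs of the current row into its parent row until one node remains.
import Mathlib
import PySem

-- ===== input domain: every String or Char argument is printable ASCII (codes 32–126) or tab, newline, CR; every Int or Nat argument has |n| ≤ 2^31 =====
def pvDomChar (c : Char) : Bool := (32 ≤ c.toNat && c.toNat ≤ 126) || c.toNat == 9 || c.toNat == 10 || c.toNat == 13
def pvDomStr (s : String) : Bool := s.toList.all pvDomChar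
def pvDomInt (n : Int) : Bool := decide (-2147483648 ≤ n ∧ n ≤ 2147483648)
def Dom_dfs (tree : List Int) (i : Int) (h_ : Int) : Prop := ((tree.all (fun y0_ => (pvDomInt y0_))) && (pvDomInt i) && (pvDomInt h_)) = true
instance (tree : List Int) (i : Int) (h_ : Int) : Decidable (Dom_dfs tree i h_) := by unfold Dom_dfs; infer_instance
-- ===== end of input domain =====

-- B replaces A's top-down recursion by an explicit bottom-up level pass over i's subtree:
-- descend to the subtree's leaf row, then repeatedly combine adjacent pairs of the current
-- row into its parent row until one node remains; objective: alternative decomposition.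


-- ===== PORT A =====
-- Python's test `i >= 2**(h-1)-1`: for h ≥ 1 an integer comparison; for h ≤ 0 the right side is a
-- float in (-1, -0.5], so for an integer i the test is exactly `0 ≤ i` (exact on integers).
def pyBase (i : Int) (h_ : Int) : Bool :=
  if 1 ≤ h_ then decide (2 ^ ((h_ - 1).toNat) - 1 ≤ i) else decide (0 ≤ i)

def dfs (tree : List Int) (i : Int) (h_ : Int) : List Int :=
  if hb : pyBase i h_ then [(PySem.List.pyGet? tree i).getD 0, 1]
  else if hneg : i < 0 then []  -- Python recurses forever here (guard only makes the port total)
  else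
    match dfs tree (2 * i + 1) h_, dfs tree (2 * i + 2) h_ with
    | [ls, li], [rs, ri] =>
      let res := li * ri
      let res := if ls ≠ rs then res * 2 else res
      if ls > rs then [(PySem.List.pyGet? tree i).getD 0 + rs + ls, res]
      else [(PySem.List.pyGet? tree i).getD 0 + ls + rs, res]
    | _, _ => []
termination_by (2 ^ ((h_ - 1).toNat) - 1 - i).toNat
decreasing_by
  all_goals
    simp only [pyBase] at hb
    split at hb <;> simp at hb
    · rw [show h_.toNat - 1 = (h_ - 1).toNat from by omega] at hb
      generalize (2 ^ ((h_ - 1).toNat) : Int) = P at *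
      omega
    · omega

-- ===== PORT B =====
-- B's first while loop: descend to the leaf row of i's subtree (lo, w = start and width of the row)
def growB (L lo w : Int) : Int × Int :=
  if h1 : lo < L then
    if h2 : lo < 0 then (lo, w)  -- Python loops forever here (guard only makes the port total)
    else growB L (2 * lo + 1) (2 * w)
  else (lo, w)
termination_by (L - lo).toNat
decreasing_by omega

-- body of B's inner for loop: combine the pair cur[2t], cur[2t+1] into parent lo' + t
def rowCombine (tree : List Int) (cur : List (Int × Int)) (lo' : Int) (t : Nat) : Int × Int :=
  let l := cur.getD (2 * t) (0, 0)
  let r := cur.getD (2 * t + 1) (0, 0)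
  let res := l.2 * r.2
  let res := if l.1 ≠ r.1 then res * 2 else res
  ((PySem.List.pyGet? tree (lo' + t)).getD 0 + (if l.1 > r.1 then r.1 + l.1 else l.1 + r.1), res)

-- B's second while loop: fold the current row into parent rows until one node remains
def shrinkB (tree : List Int) (lo w : Int) (cur : List (Int × Int)) : List (Int × Int) :=
  if h1 : 1 < w then
    let lo' := PySem.Int.floordiv (lo - 1) 2
    let w' := PySem.Int.floordiv w 2
    shrinkB tree lo' w' ((List.range w'.toNat).map (rowCombine tree cur lo'))
  else cur
termination_by w.toNat
decreasing_by
  rw [PySem.Int.floordiv_eq_ediv_of_pos (by omega)]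
  omega

def dfs_alt (tree : List Int) (i : Int) (h_ : Int) : List Int :=
  if pyBase i h_ then [(PySem.List.pyGet? tree i).getD 0, 1]
  else if i < 0 then []  -- Python's first while loop never terminates here (totality guard)
  else
    let L : Int := 2 ^ ((h_ - 1).toNat) - 1
    let p := growB L i 1
    let cur := (List.range p.2.toNat).map
      (fun (t : Nat) => ((PySem.List.pyGet? tree (p.1 + (t : Int))).getD 0, (1 : Int)))
    match shrinkB tree p.1 p.2 cur with
    | (s, c) :: _ => [s, c]
    | [] => []

-- ===== PRECONDITION & SPEC =====
-- Pre_ excludes exactly the inputs on which the Python A does not return: i < 0 (A recurses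
-- forever) and trees too short for i's subtree (A raises IndexError at some tree[j]); it
-- excludes no input on which A returns a value.
def Pre_dfs (tree : List Int) (i : Int) (h_ : Int) : Prop :=
  0 ≤ i ∧
  ((h_ ≤ 0 ∨ 2 ^ ((h_ - 1).toNat) - 1 ≤ i) → i < (tree.length : Int)) ∧
  ((1 ≤ h_ ∧ i < 2 ^ ((h_ - 1).toNat) - 1) →
    (i + 2) * 2 ^ ((h_ - 1).toNat - Nat.log2 (i.toNat + 1)) - 2 < (tree.length : Int))
instance (tree : List Int) (i : Int) (h_ : Int) : Decidable (Pre_dfs tree i h_) := by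
  unfold Pre_dfs; infer_instance

def pvWitness_dfs : List Int × Int × Int := ([5, 1, 2], 0, 2)

def Spec_dfs (tree : List Int) (i : Int) (h_ : Int) (out : List Int) : Prop := out = dfs_alt tree i h_
instance (tree : List Int) (i : Int) (h_ : Int) (out : List Int) : Decidable (Spec_dfs tree i h_ out) := by unfold Spec_dfs; infer_instance

-- ===== CLAIM (what is proved, stated in full; the proofs are below) =====
def Claim_equal_dfs : Prop := ∀ (tree : List Int) (i : Int) (h_ : Int), Dom_dfs tree i h_ → Pre_dfs tree i h_ → Spec_dfs tree i h_ (dfs tree i h_)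

-- ===== LEMMAS AND PROOFS =====

theorem dfs_base (tree : List Int) (i h_ : Int) (hb : pyBase i h_ = true) :
    dfs tree i h_ = [(PySem.List.pyGet? tree i).getD 0, 1] := by
  rw [dfs]; simp [hb]

theorem dfs_internal (tree : List Int) (i h_ : Int) (hb : ¬ pyBase i h_ = true) (hi : 0 ≤ i)
    (ls li rs ri : Int)
    (hL : dfs tree (2 * i + 1) h_ = [ls, li]) (hR : dfs tree (2 * i + 2) h_ = [rs, ri]) :
    dfs tree i h_ =
      if ls > rs then [(PySem.List.pyGet? tree i).getD 0 + rs + ls, if ls ≠ rs then li * ri * 2 else li * ri]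
      else [(PySem.List.pyGet? tree i).getD 0 + ls + rs, if ls ≠ rs then li * ri * 2 else li * ri] := by
  rw [dfs]
  rw [dif_neg (by simp [hb]), dif_neg (show ¬ i < 0 by omega)]
  rw [hL, hR]

theorem not_base (i h_ : Int) (hi : 0 ≤ i) (hb : ¬ pyBase i h_ = true) :
    1 ≤ h_ ∧ i < 2 ^ ((h_ - 1).toNat) - 1 := by
  simp only [pyBase] at hb
  split at hb <;> simp at hb
  · rw [show h_.toNat - 1 = (h_ - 1).toNat from by omega] at hb; omega
  · omega

theorem base_of (i h_ : Int) (hh : 1 ≤ h_) (hL : 2 ^ ((h_ - 1).toNat) - 1 ≤ i) :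
    pyBase i h_ = true := by
  rw [show ((h_ - 1).toNat) = h_.toNat - 1 from by omega] at hL
  simp [pyBase, if_pos hh]
  omega

theorem dfs_pair (tree : List Int) (h_ : Int) :
    ∀ (m : Nat) (i : Int), 0 ≤ i → (2 ^ ((h_ - 1).toNat) - 1 - i).toNat ≤ m →
      ∃ a b, dfs tree i h_ = [a, b] := by
  intro m
  induction m with
  | zero =>
    intro i hi hm
    by_cases hb : pyBase i h_
    · exact ⟨_, _, dfs_base tree i h_ hb⟩
    · exact absurd ((not_base i h_ hi hb).2) (by omega)
  | succ m ih =>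
    intro i hi hm
    by_cases hb : pyBase i h_
    · exact ⟨_, _, dfs_base tree i h_ hb⟩
    · have hnb := not_base i h_ hi hb
      obtain ⟨ls, li, hL⟩ := ih (2 * i + 1) (by omega) (by omega)
      obtain ⟨rs, ri, hR⟩ := ih (2 * i + 2) (by omega) (by omega)
      rw [dfs_internal tree i h_ hb hi ls li rs ri hL hR]
      by_cases hls : ls > rs
      · exact ⟨_, _, if_pos hls⟩
      · exact ⟨_, _, if_neg hls⟩

-- the two per-index values A computes, read off A's (2-element) result
def A0 (tree : List Int) (h_ k : Int) : Int := (dfs tree k h_).getD 0 0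
def A1 (tree : List Int) (h_ k : Int) : Int := (dfs tree k h_).getD 1 0

theorem dfs_eq_A (tree : List Int) (h_ i : Int) (hi : 0 ≤ i) :
    dfs tree i h_ = [A0 tree h_ i, A1 tree h_ i] := by
  obtain ⟨a, b, hab⟩ := dfs_pair tree h_ (2 ^ ((h_ - 1).toNat) - 1 - i).toNat i hi le_rfl
  simp [A0, A1, hab]

theorem getD_map_range {α : Type} (f : Nat → α) (n t : Nat) (d : α) (h : t < n) :
    ((List.range n).map f).getD t d = f t := by
  simp [List.getD_eq_getElem?_getD, h]

-- B's descent loop reaches the leaf row (i+1)*2^k-1 .. (i+1)*2^k-1 + w*2^k - 1, with k minimal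
theorem growB_spec (L : Int) : ∀ (n : Nat) (lo w : Int), 0 ≤ lo → (L - lo).toNat ≤ n →
    ∃ k : Nat, growB L lo w = ((lo + 1) * 2 ^ k - 1, w * 2 ^ k) ∧
      L ≤ (lo + 1) * 2 ^ k - 1 ∧ (∀ j : Nat, j < k → (lo + 1) * 2 ^ j - 1 < L) := by
  intro n
  induction n with
  | zero =>
    intro lo w hlo hn
    refine ⟨0, ?_, by omega, by omega⟩
    rw [growB, dif_neg (by omega)]
    norm_num
  | succ n ih =>
    intro lo w hlo hn
    by_cases h1 : lo < L
    · obtain ⟨k, hk, hge, hmin⟩ := ih (2 * lo + 1) (2 * w) (by omega) (by omega)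
      refine ⟨k + 1, ?_, ?_, ?_⟩
      · rw [growB, dif_pos h1, dif_neg (by omega), hk]
        simp only [Prod.mk.injEq]; constructor <;> ring
      · calc L ≤ (2 * lo + 1 + 1) * 2 ^ k - 1 := hge
          _ = (lo + 1) * 2 ^ (k + 1) - 1 := by ring
      · intro j hj
        match j with
        | 0 => simpa using h1
        | j + 1 =>
          calc (lo + 1) * 2 ^ (j + 1) - 1 = (2 * lo + 1 + 1) * 2 ^ j - 1 := by ring
            _ < L := hmin j (by omega)
    · refine ⟨0, ?_, by omega, by omega⟩
      rw [growB, dif_neg h1]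
      norm_num

-- B's fold loop: if row m holds A's values for nodes q*2^m-1 .. , it collapses to A's value at q-1
theorem shrinkB_spec (tree : List Int) (h_ : Int) (hh : 1 ≤ h_) (q : Int) (hq : 1 ≤ q) :
    ∀ (m : Nat) (cur : List (Int × Int)),
      q * 2 ^ m < 2 ^ h_.toNat →
      cur.length = 2 ^ m →
      (∀ t : Nat, t < 2 ^ m →
        cur.getD t (0, 0) = (A0 tree h_ (q * 2 ^ m - 1 + t), A1 tree h_ (q * 2 ^ m - 1 + t))) →
      shrinkB tree (q * 2 ^ m - 1) (2 ^ m) cur = [(A0 tree h_ (q - 1), A1 tree h_ (q - 1))] := by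
  intro m
  induction m with
  | zero =>
    intro cur _ hlen hval
    rw [shrinkB, dif_neg (by norm_num)]
    match cur, hlen with
    | [x], _ =>
      have := hval 0 (by norm_num)
      simp at this
      simp [this]
  | succ m ih =>
    intro cur hbound hlen hval
    have hm1 : m + 1 < h_.toNat := by
      by_contra hcon
      have h2 : (2 : Int) ^ h_.toNat ≤ 2 ^ (m + 1) := by
        apply pow_le_pow_right₀ (by norm_num)
        omega
      nlinarith [pow_pos (show (0:Int) < 2 by norm_num) (m + 1)]
    have hqlt : q < 2 ^ (h_.toNat - (m + 1)) := by
      have hsplit : (2 : Int) ^ h_.toNat = 2 ^ (h_.toNat - (m + 1)) * 2 ^ (m + 1) := by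
        rw [← pow_add]
        congr 1
        omega
      rw [hsplit] at hbound
      have := pow_pos (show (0:Int) < 2 by norm_num) (m + 1)
      exact lt_of_mul_lt_mul_right (by nlinarith) (le_of_lt this)
    -- parents j = q*2^m - 1 + t (t < 2^m) are internal: j < 2^((h_-1).toNat) - 1
    have hpar : ∀ t : Nat, t < 2 ^ m → q * 2 ^ m - 1 + (t : Int) < 2 ^ ((h_ - 1).toNat) - 1 := by
      intro t ht
      have h1 : q + 1 ≤ 2 ^ (h_.toNat - (m + 1)) := by omega
      have h2 : (q + 1) * 2 ^ m ≤ 2 ^ (h_.toNat - (m + 1)) * 2 ^ m :=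
        mul_le_mul_of_nonneg_right h1 (by positivity)
      have h3 : (2 : Int) ^ (h_.toNat - (m + 1)) * 2 ^ m = 2 ^ ((h_ - 1).toNat) := by
        rw [← pow_add]
        congr 1
        omega
      have ht' : (t : Int) < 2 ^ m := by exact_mod_cast ht
      nlinarith
    rw [shrinkB, dif_pos (by
      have := pow_pos (show (0:Int) < 2 by norm_num) m
      rw [pow_succ]; nlinarith)]
    have hlo' : PySem.Int.floordiv (q * 2 ^ (m + 1) - 1 - 1) 2 = q * 2 ^ m - 1 := by
      rw [show q * 2 ^ (m + 1) - 1 - 1 = (q * 2 ^ m - 1) * 2 from by ring,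
          PySem.Int.floordiv_eq_ediv_of_pos (by norm_num)]
      exact Int.mul_ediv_cancel _ (by norm_num)
    have hw' : PySem.Int.floordiv ((2 : Int) ^ (m + 1)) 2 = 2 ^ m := by
      rw [show ((2 : Int) ^ (m + 1)) = 2 ^ m * 2 from by ring,
          PySem.Int.floordiv_eq_ediv_of_pos (by norm_num)]
      exact Int.mul_ediv_cancel _ (by norm_num)
    simp only [hlo', hw']
    have htn : ((2 : Int) ^ m).toNat = 2 ^ m := by
      rw [show ((2 : Int) ^ m) = ((2 ^ m : Nat) : Int) from by push_cast; ring, Int.toNat_natCast]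
    rw [htn]
    -- the mapped row holds A's values at level m
    have hrow : ∀ t : Nat, t < 2 ^ m →
        rowCombine tree cur (q * 2 ^ m - 1) t =
          (A0 tree h_ (q * 2 ^ m - 1 + t), A1 tree h_ (q * 2 ^ m - 1 + t)) := by
      intro t ht
      have hjpos : (0 : Int) ≤ q * 2 ^ m - 1 + t := by
        have := pow_pos (show (0:Int) < 2 by norm_num) m
        have ht0 : (0 : Int) ≤ t := by positivity
        nlinarith
      have hc1 : cur.getD (2 * t) (0, 0) =
          (A0 tree h_ (q * 2 ^ (m + 1) - 1 + (2 * t : Nat)), A1 tree h_ (q * 2 ^ (m + 1) - 1 + (2 * t : Nat))) :=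
        hval (2 * t) (by rw [pow_succ]; omega)
      have hc2 : cur.getD (2 * t + 1) (0, 0) =
          (A0 tree h_ (q * 2 ^ (m + 1) - 1 + (2 * t + 1 : Nat)), A1 tree h_ (q * 2 ^ (m + 1) - 1 + (2 * t + 1 : Nat))) :=
        hval (2 * t + 1) (by rw [pow_succ]; omega)
      have hch1 : (q * 2 ^ (m + 1) - 1 + ((2 * t : Nat) : Int)) = 2 * (q * 2 ^ m - 1 + t) + 1 := by
        push_cast; ring
      have hch2 : (q * 2 ^ (m + 1) - 1 + ((2 * t + 1 : Nat) : Int)) = 2 * (q * 2 ^ m - 1 + t) + 2 := by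
        push_cast; ring
      rw [hch1] at hc1
      rw [hch2] at hc2
      have hnb : ¬ pyBase (q * 2 ^ m - 1 + t) h_ = true := by
        intro hbt
        simp only [pyBase, if_pos hh] at hbt
        simp at hbt
        rw [show h_.toNat - 1 = (h_ - 1).toNat from by omega] at hbt
        have := hpar t ht
        omega
      have hA := dfs_internal tree (q * 2 ^ m - 1 + t) h_ hnb hjpos _ _ _ _
        (dfs_eq_A tree h_ (2 * (q * 2 ^ m - 1 + t) + 1) (by omega))
        (dfs_eq_A tree h_ (2 * (q * 2 ^ m - 1 + t) + 2) (by omega))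
      simp only [rowCombine, hc1, hc2]
      rw [show A0 tree h_ (q * 2 ^ m - 1 + t) = (dfs tree (q * 2 ^ m - 1 + t) h_).getD 0 0 from rfl,
          show A1 tree h_ (q * 2 ^ m - 1 + t) = (dfs tree (q * 2 ^ m - 1 + t) h_).getD 1 0 from rfl, hA]
      by_cases hgt : A0 tree h_ (2 * (q * 2 ^ m - 1 + t) + 1) > A0 tree h_ (2 * (q * 2 ^ m - 1 + t) + 2) <;>
        by_cases hne : A0 tree h_ (2 * (q * 2 ^ m - 1 + t) + 1) = A0 tree h_ (2 * (q * 2 ^ m - 1 + t) + 2) <;>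
          simp [hgt, hne] <;> ring_nf
    have := ih ((List.range (2 ^ m)).map (rowCombine tree cur (q * 2 ^ m - 1)))
      (by
        have := pow_pos (show (0:Int) < 2 by norm_num) m
        rw [pow_succ] at hbound
        nlinarith)
      (by simp)
      (by
        intro t ht
        rw [getD_map_range _ _ _ _ ht]
        exact hrow t ht)
    exact this

-- ===== VERDICT (by name: the statement is the Claim_ definition above) =====
theorem dfs_spec : Claim_equal_dfs := by
  intro tree i h_ _hdom hpre
  obtain ⟨hi, _, _⟩ := hpre
  unfold Spec_dfs
  by_cases hb : pyBase i h_
  · rw [dfs_base tree i h_ hb]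
    unfold dfs_alt
    rw [if_pos hb]
  · have hnb := not_base i h_ hi hb
    obtain ⟨hh, hint⟩ := hnb
    have halt : dfs_alt tree i h_ =
        (let p := growB (2 ^ ((h_ - 1).toNat) - 1) i 1
         let cur := (List.range p.2.toNat).map
           (fun (t : Nat) => ((PySem.List.pyGet? tree (p.1 + (t : Int))).getD 0, (1 : Int)))
         match shrinkB tree p.1 p.2 cur with
         | (s, c) :: _ => [s, c]
         | [] => []) := by
      unfold dfs_alt
      rw [if_neg (by simp [hb]), if_neg (show ¬ i < 0 by omega)]
    obtain ⟨k, hk, hge, hmin⟩ := growB_spec (2 ^ ((h_ - 1).toNat) - 1)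
      (2 ^ ((h_ - 1).toNat) - 1 - i).toNat i 1 hi le_rfl
    have hk1 : 1 ≤ k := by
      rcases Nat.eq_zero_or_pos k with h0 | h1
      · subst h0; rw [pow_zero, mul_one] at hge; omega
      · exact h1
    have hbound : (i + 1) * 2 ^ k < 2 ^ h_.toNat := by
      have hmin' := hmin (k - 1) (by omega)
      have hsp : (2 : Int) ^ h_.toNat = 2 ^ ((h_ - 1).toNat) * 2 := by
        rw [show h_.toNat = (h_ - 1).toNat + 1 from by omega, pow_succ]
      have hk' : (2 : Int) ^ k = 2 ^ (k - 1) * 2 := by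
        rw [← pow_succ]; congr 1; omega
      rw [hsp, hk', ← mul_assoc]
      have := hmin'
      nlinarith
    rw [halt]
    simp only [hk, one_mul]
    have htn : ((2 : Int) ^ k).toNat = 2 ^ k := by
      rw [show ((2 : Int) ^ k) = ((2 ^ k : Nat) : Int) from by push_cast; ring, Int.toNat_natCast]
    rw [htn]
    have hleaf : ∀ t : Nat, t < 2 ^ k →
        ((List.range (2 ^ k)).map
          (fun (t : Nat) => ((PySem.List.pyGet? tree ((i + 1) * 2 ^ k - 1 + (t : Int))).getD 0, (1 : Int)))).getD t (0, 0) =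
          (A0 tree h_ ((i + 1) * 2 ^ k - 1 + t), A1 tree h_ ((i + 1) * 2 ^ k - 1 + t)) := by
      intro t ht
      rw [getD_map_range _ _ _ _ ht]
      have hbase : pyBase ((i + 1) * 2 ^ k - 1 + t) h_ = true := by
        apply base_of _ _ hh
        have ht0 : (0 : Int) ≤ t := by positivity
        omega
      have := dfs_base tree ((i + 1) * 2 ^ k - 1 + t) h_ hbase
      simp [A0, A1, this]
    have hsh := shrinkB_spec tree h_ hh (i + 1) (by omega) k _ hbound (by simp) hleaf
    rw [hsh]
    rw [dfs_eq_A tree h_ i hi]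
    simp
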